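-- pv_equiv track=rewrite | github.com/kelvinhuang0327/number-pattern-research | tools/audit_scientific_integrity.py | cluster_pivot_4bet
-- ===== SOURCE A (Python) =====
-- from collections import Counter
--
-- def cluster_pivot_4bet(history, rules):
--     from itertools import combinations
--     max_num = rules.get('maxNumber', 49)
--     pick_count = rules.get('pickCount', 6)
--     cooccur = Counter()
--     for draw in history[-100:]:
--         nums = draw['numbers']
--         for pair in combinations(sorted(nums), 2):
--             cooccur[pair] += 1
--     num_scores = Counter()
--     for (a, b), count in cooccur.items():
--         num_scores[a] += count
--         num_scores[b] += count
--     centers = [num for num, _ in num_scores.most_common(8)]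
--     bets = []
--     used = set()
--     for i in range(4):
--         anchor = centers[i]
--         candidates = Counter()
--         for (a, b), count in cooccur.items():
--             if a == anchor and b not in used: candidates[b] += count
--             elif b == anchor and a not in used: candidates[a] += count
--         bet = [anchor]
--         for num, _ in candidates.most_common(pick_count - 1):
--             if num not in bet: bet.append(num)
--         while len(bet) < pick_count:
--             for n in range(1, max_num + 1):
--                 if n not in bet and n not in used:
--                     bet.append(n)
--                     break
--         bets.append(sorted(bet[:pick_count]))
--         used.update(bet[:1])
--     return {'details': {'bets': bets}}
-- ===== SOURCE B (Python) =====
-- from collections import Counter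
-- from itertools import combinations
--
--
-- def cluster_pivot_4bet(history, rules):
--     max_num = rules.get('maxNumber', 49)
--     pick_count = rules.get('pickCount', 6)
--     # one Counter fed by a flat pair stream instead of nested += loops
--     cooccur = Counter(
--         pair
--         for draw in history[-100:]
--         for pair in combinations(sorted(draw['numbers']), 2)
--     )
--     # ONE pass over cooccur.items() builds both the score table and an
--     # adjacency index; A instead rescans the whole pair table once per anchor
--     num_scores = Counter()
--     adj = {}
--     for (a, b), count in cooccur.items():
--         num_scores[a] += count
--         num_scores[b] += count
--         adj.setdefault(a, Counter())[b] += count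
--         if a != b:
--             adj.setdefault(b, Counter())[a] += count
--     centers = [num for num, _ in num_scores.most_common(8)]
--     bets = []
--     used = set()
--     for anchor in centers[:4]:
--         cands = [(n, c) for n, c in adj.get(anchor, Counter()).items() if n not in used]
--         cands.sort(key=lambda t: t[1], reverse=True)  # stable, like most_common
--         bet = [anchor]
--         for num, _ in cands[:max(pick_count - 1, 0)]:
--             if num not in bet:
--                 bet.append(num)
--         if len(bet) < pick_count:
--             # single scan instead of A's restart-from-1 rescan per slot
--             fills = [n for n in range(1, max_num + 1) if n not in bet and n not in used]
--             bet += fills[:pick_count - len(bet)]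
--         bets.append(sorted(bet[:pick_count]))
--         used.add(anchor)
--     return {'details': {'bets': bets}}
-- ===== Notes on version B (the rewrite author's own statement) =====
-- stated objective: alternative
-- what changed: B replaces A's four full rescans of the co-occurrence pair table (one per anchor) by a single pass over cooccur.items() that builds an adjacency index (dict of Counters) together with the score table, per-anchor candidates then being a filter+stable-sort of the anchor's adjacency row; the numeric fill is one forward scan instead of A's restart-from-1 rescan per empty slot.
import Mathlib
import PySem

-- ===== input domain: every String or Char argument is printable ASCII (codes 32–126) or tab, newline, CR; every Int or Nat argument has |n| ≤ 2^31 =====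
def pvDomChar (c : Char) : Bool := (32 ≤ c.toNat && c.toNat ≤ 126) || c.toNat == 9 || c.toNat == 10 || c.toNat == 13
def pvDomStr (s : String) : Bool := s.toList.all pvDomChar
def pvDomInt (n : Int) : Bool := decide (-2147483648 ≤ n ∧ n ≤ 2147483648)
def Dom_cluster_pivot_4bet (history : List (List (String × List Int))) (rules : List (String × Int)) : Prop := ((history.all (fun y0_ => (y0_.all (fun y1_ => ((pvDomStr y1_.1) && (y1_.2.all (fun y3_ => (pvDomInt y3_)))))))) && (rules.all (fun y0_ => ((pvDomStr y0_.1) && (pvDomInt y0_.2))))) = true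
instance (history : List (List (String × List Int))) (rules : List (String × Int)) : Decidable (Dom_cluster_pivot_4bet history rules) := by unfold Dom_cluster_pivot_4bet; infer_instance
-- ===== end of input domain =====

-- B replaces A's four rescans of the co-occurrence table by one pass that builds an
-- adjacency index alongside the score table (no speed claim; same return value).
-- Both Pythons mutate nothing observable; the equivalence is about the return value.

-- ===== PORT A =====
-- itertools.combinations(xs, 2) as tuple pairs (every member of `combinations xs 2` has length 2)
def pairs2 (xs : List Int) : List (Int × Int) :=
  (PySem.List.combinations xs 2).map (fun c => (c.getD 0 0, c.getD 1 0))

-- combinations(sorted(draw['numbers']), 2); draw['numbers'] raises KeyError when the key is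
-- absent — Pre_ excludes that, so the `.getD []` default is never reached under Pre_.
def drawPairs (draw : List (String × List Int)) : List (Int × Int) :=
  pairs2 (PySem.List.sorted (((PySem.Dict.mk draw).get? "numbers").getD []) (fun x => x) false)

-- Counter.most_common(n): stable sort by count descending, first n (n < 0 gives [])
def mostCommon (d : PySem.Dict Int Int) (n : Int) : List (Int × Int) :=
  if n < 0 then [] else (PySem.List.sorted d.items (fun kv => kv.2) true).take n.toNat

-- A's `while len(bet) < pick_count: for n in range(1, max_num+1): …` — each pass appends the
-- first available n and restarts.  Where Python finds no n it loops forever; Pre_'s margin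
-- condition excludes that, and this port stops there.
def fillLoop (maxNum pickCount : Int) (used : PySem.Set Int) (bet : List Int) : List Int :=
  if _h : (bet.length : Int) < pickCount then
    match (PySem.List.pyRange 1 (maxNum + 1) 1).find?
        (fun n => !bet.contains n && !(PySem.Set.contains used n)) with
    | some n => fillLoop maxNum pickCount used (bet ++ [n])
    | none => bet
  else bet
termination_by (pickCount - bet.length).toNat
decreasing_by simp only [List.length_append, List.length_cons, List.length_nil]; omega

def cluster_pivot_4bet (history : List (List (String × List Int))) (rules : List (String × Int)) : List (String × List (String × List (List Int))) :=
  let maxNum := (PySem.Dict.mk rules).getD "maxNumber" 49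
  let pickCount := (PySem.Dict.mk rules).getD "pickCount" 6
  let cooccur : PySem.Dict (Int × Int) Int :=
    (PySem.List.slice history (some (-100)) none).foldl
      (fun co draw => (drawPairs draw).foldl (fun co p => co.modify p 0 (· + 1)) co)
      PySem.Dict.empty
  let numScores : PySem.Dict Int Int :=
    cooccur.items.foldl
      (fun ns kv => (ns.modify kv.1.1 0 (· + kv.2)).modify kv.1.2 0 (· + kv.2))
      PySem.Dict.empty
  let centers := (mostCommon numScores 8).map (fun kv => kv.1)
  let st := (PySem.List.pyRange 0 4 1).foldl
    (fun (st : List (List Int) × PySem.Set Int) i =>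
      match PySem.List.pyGet? centers i with
      | none => st   -- centers[i]: IndexError in Python; Pre_ guarantees four centers
      | some anchor =>
        let candidates : PySem.Dict Int Int :=
          cooccur.items.foldl
            (fun cand kv =>
              if kv.1.1 == anchor && !(PySem.Set.contains st.2 kv.1.2) then
                cand.modify kv.1.2 0 (· + kv.2)
              else if kv.1.2 == anchor && !(PySem.Set.contains st.2 kv.1.1) then
                cand.modify kv.1.1 0 (· + kv.2)
              else cand)
            PySem.Dict.empty
        let bet := (mostCommon candidates (pickCount - 1)).foldl
          (fun bet kv => if bet.contains kv.1 then bet else bet ++ [kv.1]) [anchor]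
        let bet := fillLoop maxNum pickCount st.2 bet
        (st.1 ++ [PySem.List.sorted (PySem.List.slice bet none (some pickCount)) (fun x => x) false],
         (PySem.List.slice bet none (some 1)).foldl PySem.Set.add st.2))
    ([], PySem.Set.empty)
  [("details", [("bets", st.1)])]

-- ===== PORT B =====
def cluster_pivot_4bet_alt (history : List (List (String × List Int))) (rules : List (String × Int)) : List (String × List (String × List (List Int))) :=
  let maxNum := (PySem.Dict.mk rules).getD "maxNumber" 49
  let pickCount := (PySem.Dict.mk rules).getD "pickCount" 6
  -- Counter(<generator of pairs>) over one flat pair stream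
  let cooccur : PySem.Dict (Int × Int) Int :=
    PySem.Dict.counter ((PySem.List.slice history (some (-100)) none).flatMap drawPairs)
  -- one pass over cooccur.items() building score table and adjacency index together
  let sa := cooccur.items.foldl
    (fun (sa : PySem.Dict Int Int × PySem.Dict Int (PySem.Dict Int Int)) kv =>
      ((sa.1.modify kv.1.1 0 (· + kv.2)).modify kv.1.2 0 (· + kv.2),
       let adj := sa.2.modify kv.1.1 PySem.Dict.empty (fun d => d.modify kv.1.2 0 (· + kv.2))
       if kv.1.1 == kv.1.2 then adj
       else adj.modify kv.1.2 PySem.Dict.empty (fun d => d.modify kv.1.1 0 (· + kv.2))))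
    (PySem.Dict.empty, PySem.Dict.empty)
  let centers := (mostCommon sa.1 8).map (fun kv => kv.1)
  let st := (PySem.List.slice centers none (some 4)).foldl
    (fun (st : List (List Int) × PySem.Set Int) anchor =>
      let cands := ((sa.2.getD anchor PySem.Dict.empty).items).filter
        (fun kv => !(PySem.Set.contains st.2 kv.1))
      let ranked := PySem.List.sorted cands (fun kv => kv.2) true
      let bet := (ranked.take (max (pickCount - 1) 0).toNat).foldl
        (fun bet kv => if bet.contains kv.1 then bet else bet ++ [kv.1]) [anchor]
      let bet :=
        if (bet.length : Int) < pickCount then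
          bet ++ ((PySem.List.pyRange 1 (maxNum + 1) 1).filter
            (fun n => !bet.contains n && !(PySem.Set.contains st.2 n))).take
              (pickCount - bet.length).toNat
        else bet
      (st.1 ++ [PySem.List.sorted (PySem.List.slice bet none (some pickCount)) (fun x => x) false],
       PySem.Set.add st.2 anchor))
    ([], PySem.Set.empty)
  [("details", [("bets", st.1)])]

-- ===== PRECONDITION & SPEC =====
-- Pre_ excludes exactly the inputs where Python A does not return normally: a windowed draw
-- without a 'numbers' key (KeyError), fewer than four scored numbers (centers[i] IndexError),
-- and — a stated narrowing — it requires the margin pickCount + 3 ≤ maxNumber, a sufficient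
-- closed-form guarantee that A's fill `while` always finds a number (the exact termination
-- condition would re-simulate the run); some terminating inputs below the margin are excluded.
def Pre_cluster_pivot_4bet (history : List (List (String × List Int))) (rules : List (String × Int)) : Prop :=
  (∀ draw ∈ PySem.List.slice history (some (-100)) none,
      (PySem.Dict.mk draw).contains "numbers" = true) ∧
  4 ≤ (PySem.Set.ofList
        ((((PySem.List.slice history (some (-100)) none).filterMap
            (fun draw => (PySem.Dict.mk draw).get? "numbers")).filter
            (fun ns => 2 ≤ ns.length)).flatten)).length ∧
  (PySem.Dict.mk rules).getD "pickCount" 6 + 3 ≤ (PySem.Dict.mk rules).getD "maxNumber" 49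

instance (history : List (List (String × List Int))) (rules : List (String × Int)) : Decidable (Pre_cluster_pivot_4bet history rules) := by unfold Pre_cluster_pivot_4bet; infer_instance

def pvWitness_cluster_pivot_4bet : (List (List (String × List Int))) × (List (String × Int)) :=
  ([[("numbers", [1, 2, 3, 4])]], [("maxNumber", 9), ("pickCount", 2)])

def Spec_cluster_pivot_4bet (history : List (List (String × List Int))) (rules : List (String × Int)) (out : List (String × List (String × List (List Int)))) : Prop := out = cluster_pivot_4bet_alt history rules
instance (history : List (List (String × List Int))) (rules : List (String × Int)) (out : List (String × List (String × List (List Int)))) : Decidable (Spec_cluster_pivot_4bet history rules out) := by unfold Spec_cluster_pivot_4bet; infer_instance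

-- ===== CLAIM (what is proved, stated in full; the proofs are below) =====
def Claim_equal_cluster_pivot_4bet : Prop := ∀ (history : List (List (String × List Int))) (rules : List (String × Int)), Dom_cluster_pivot_4bet history rules → Pre_cluster_pivot_4bet history rules → Spec_cluster_pivot_4bet history rules (cluster_pivot_4bet history rules)


-- ===== LEMMAS AND PROOFS =====

-- proof-side abbreviations for the loop bodies the two ports share structurally
def nbrs (L : List ((Int × Int) × Int)) (x : Int) : List (Int × Int) :=
  L.filterMap (fun kv =>
    if kv.1.1 == x then some (kv.1.2, kv.2)
    else if kv.1.2 == x then some (kv.1.1, kv.2) else none)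

def wc (init : PySem.Dict Int Int) (s : List (Int × Int)) : PySem.Dict Int Int :=
  s.foldl (fun d kc => d.modify kc.1 0 (· + kc.2)) init

theorem wc_nil (c : PySem.Dict Int Int) : wc c [] = c := rfl
theorem wc_cons (c : PySem.Dict Int Int) (kc : Int × Int) (s : List (Int × Int)) :
    wc c (kc :: s) = wc (c.modify kc.1 0 (· + kc.2)) s := rfl

theorem contains_congr_filter (p : Int → Bool) (c d : PySem.Dict Int Int)
    (h : c.items = d.items.filter (fun kv => p kv.1)) (k : Int) (hp : p k = true) :
    c.contains k = d.contains k := by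
  simp only [PySem.Dict.contains, h, List.any_filter]
  congr 1
  funext kv
  by_cases hk : kv.1 = k
  · simp [hk, hp]
  · simp [hk]

theorem getD_congr_filter (p : Int → Bool) (c d : PySem.Dict Int Int)
    (hc : c.keys.Nodup) (hd : d.keys.Nodup)
    (h : c.items = d.items.filter (fun kv => p kv.1)) (k : Int) (hp : p k = true) :
    c.getD k 0 = d.getD k 0 := by
  cases hdc : d.contains k with
  | false =>
    have hcc : c.contains k = false := by rw [contains_congr_filter p c d h k hp, hdc]
    rw [PySem.Dict.getD_of_not_contains c 0 hcc, PySem.Dict.getD_of_not_contains d 0 hdc]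
  | true =>
    obtain ⟨kv, hmem, hkk⟩ := List.any_eq_true.mp hdc
    have hk1 : kv.1 = k := by simpa using hkk
    have hdm : (k, kv.2) ∈ d.items := by rw [← hk1]; exact hmem
    have hcm : (k, kv.2) ∈ c.items := by
      rw [h, List.mem_filter]; exact ⟨hdm, hp⟩
    rw [PySem.Dict.getD_of_mem_items c hcm hc 0, PySem.Dict.getD_of_mem_items d hdm hd 0]

theorem mod_items (p : Int → Bool) (c d : PySem.Dict Int Int)
    (hc : c.keys.Nodup) (hd : d.keys.Nodup)
    (h : c.items = d.items.filter (fun kv => p kv.1)) (k : Int) (cnt : Int) :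
    (if p k then c.modify k 0 (· + cnt) else c).items
      = (d.modify k 0 (· + cnt)).items.filter (fun kv => p kv.1) := by
  simp only [PySem.Dict.modify]
  by_cases hp : p k = true
  · have hgd : c.getD k 0 = d.getD k 0 := getD_congr_filter p c d hc hd h k hp
    rw [hp, if_pos rfl, hgd]
    cases hdc : d.contains k with
    | false =>
      have hcc : c.contains k = false := by rw [contains_congr_filter p c d h k hp, hdc]
      rw [PySem.Dict.items_insert_of_not_contains c _ hcc,
          PySem.Dict.items_insert_of_not_contains d _ hdc,
          List.filter_append, h]
      simp [hp]
    | true =>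
      have hcc : c.contains k = true := by rw [contains_congr_filter p c d h k hp, hdc]
      rw [PySem.Dict.items_insert_of_contains c _ hcc,
          PySem.Dict.items_insert_of_contains d _ hdc, h,
          List.filter_map]
      congr 1
      apply List.filter_congr
      intro kv _
      by_cases hk : kv.1 = k
      · simp [Function.comp, hk, hp]
      · simp [Function.comp, hk]
  · have hp' : p k = false := by simpa using hp
    rw [hp', if_neg (by simp)]
    cases hdc : d.contains k with
    | false =>
      rw [PySem.Dict.items_insert_of_not_contains d _ hdc, List.filter_append, h]
      simp [hp']
    | true =>
      rw [PySem.Dict.items_insert_of_contains d _ hdc, List.filter_map]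
      have hfc : List.filter ((fun kv => p kv.1) ∘
          fun kv => if (kv.1 == k) = true then (k, d.getD k 0 + cnt) else kv) d.items
          = d.items.filter (fun kv => p kv.1) := by
        apply List.filter_congr
        intro kv _
        by_cases hk : kv.1 = k
        · simp [Function.comp, hk, hp']
        · simp [Function.comp, hk]
      rw [hfc, h]
      apply Eq.symm
      have hid : ∀ kv ∈ List.filter (fun kv => p kv.1) d.items,
          (fun q => if (q.1 == k) = true then (k, d.getD k 0 + cnt) else q) kv = kv := by
        intro kv hkv
        have hpkv : p kv.1 = true := (List.mem_filter.mp hkv).2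
        have : kv.1 ≠ k := fun he => by rw [he, hp'] at hpkv; exact Bool.false_ne_true hpkv
        simp [this]
      rw [List.map_congr_left hid]
      simp

theorem wc_filter (p : Int → Bool) (s : List (Int × Int)) :
    ∀ (c d : PySem.Dict Int Int), c.keys.Nodup → d.keys.Nodup →
    c.items = d.items.filter (fun kv => p kv.1) →
    (wc c (s.filter (fun kc => p kc.1))).items = (wc d s).items.filter (fun kv => p kv.1) := by
  induction s with
  | nil => intro c d _ _ h; simpa [wc_nil] using h
  | cons kc s ih =>
    intro c d hc hd h
    by_cases hp : p kc.1 = true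
    · have hfe : List.filter (fun kc => p kc.1) (kc :: s)
          = kc :: List.filter (fun kc => p kc.1) s := by simp [hp]
      rw [hfe, wc_cons, wc_cons]
      exact ih _ _ (PySem.Dict.nodup_keys_insert _ _ _ hc)
        (PySem.Dict.nodup_keys_insert _ _ _ hd)
        (by simpa [hp] using mod_items p c d hc hd h kc.1 kc.2)
    · have hp' : p kc.1 = false := by simpa using hp
      have hfe : List.filter (fun kc => p kc.1) (kc :: s)
          = List.filter (fun kc => p kc.1) s := by simp [hp']
      rw [hfe, wc_cons]
      exact ih _ _ hc (PySem.Dict.nodup_keys_insert _ _ _ hd)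
        (by simpa [hp'] using mod_items p c d hc hd h kc.1 kc.2)


theorem adj_getD (L : List ((Int × Int) × Int)) :
    ∀ (adj0 : PySem.Dict Int (PySem.Dict Int Int)) (x : Int),
    (L.foldl (fun adj kv =>
        let a := PySem.Dict.modify adj kv.1.1 PySem.Dict.empty (fun d => d.modify kv.1.2 0 (· + kv.2))
        if kv.1.1 == kv.1.2 then a
        else PySem.Dict.modify a kv.1.2 PySem.Dict.empty (fun d => d.modify kv.1.1 0 (· + kv.2)))
      adj0).getD x PySem.Dict.empty
      = wc (adj0.getD x PySem.Dict.empty) (nbrs L x) := by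
  induction L with
  | nil => intro adj0 x; simp [nbrs, wc]
  | cons kv L ih =>
    intro adj0 x
    rw [List.foldl_cons, ih]
    have hnb : nbrs (kv :: L) x =
        (if kv.1.1 == x then (kv.1.2, kv.2) :: nbrs L x
         else if kv.1.2 == x then (kv.1.1, kv.2) :: nbrs L x else nbrs L x) := by
      simp only [nbrs, List.filterMap_cons]
      by_cases h1 : kv.1.1 = x
      · simp [h1]
      · by_cases h2 : kv.1.2 = x <;> simp [h1, h2]
    rw [hnb]
    clear ih hnb
    by_cases h12 : kv.1.1 = kv.1.2
    · have hb : (kv.1.1 == kv.1.2) = true := beq_iff_eq.mpr h12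
      by_cases h1 : kv.1.1 = x
      · subst h1
        simp [hb, wc_cons]
      · have hbx : (kv.1.1 == x) = false := beq_eq_false_iff_ne.mpr h1
        have h2 : ¬ kv.1.2 = x := fun h => h1 (h12.trans h)
        have hbx2 : (kv.1.2 == x) = false := beq_eq_false_iff_ne.mpr h2
        simp only [hb, if_true, hbx, hbx2, Bool.false_eq_true, if_false]
        rw [PySem.Dict.getD_modify, if_neg (Ne.symm h1)]
    · have hb : (kv.1.1 == kv.1.2) = false := beq_eq_false_iff_ne.mpr h12
      by_cases h1 : kv.1.1 = x
      · subst h1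
        have h2 : ¬ kv.1.2 = kv.1.1 := fun h => h12 h.symm
        simp [hb, h12, PySem.Dict.getD_modify, wc_cons]
      · by_cases h2 : kv.1.2 = x
        · subst h2
          have h21 : ¬ kv.1.2 = kv.1.1 := fun h => h12 h.symm
          simp [hb, h21, PySem.Dict.getD_modify, wc_cons]
        · have hbx : (kv.1.1 == x) = false := beq_eq_false_iff_ne.mpr h1
          have hbx2 : (kv.1.2 == x) = false := beq_eq_false_iff_ne.mpr h2
          simp only [hb, Bool.false_eq_true, if_false, hbx, hbx2]
          rw [PySem.Dict.getD_modify, if_neg (Ne.symm h2),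
              PySem.Dict.getD_modify, if_neg (Ne.symm h1)]

theorem cand_eq_wc (anchor : Int) (used : PySem.Set Int) (L : List ((Int × Int) × Int)) :
    L.foldl (fun cand kv =>
        if kv.1.1 == anchor && !(PySem.Set.contains used kv.1.2) then
          PySem.Dict.modify cand kv.1.2 0 (· + kv.2)
        else if kv.1.2 == anchor && !(PySem.Set.contains used kv.1.1) then
          PySem.Dict.modify cand kv.1.1 0 (· + kv.2)
        else cand) PySem.Dict.empty
      = wc PySem.Dict.empty ((nbrs L anchor).filter (fun kc => !(PySem.Set.contains used kc.1))) := by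
  unfold wc nbrs
  rw [List.filter_filterMap, List.foldl_filterMap]
  apply PySem.List.foldl_congr_mem
  intro acc kv _
  by_cases h1 : kv.1.1 = anchor <;> by_cases h2 : kv.1.2 = anchor <;>
    by_cases hu1 : kv.1.1 ∈ used <;> by_cases hu2 : kv.1.2 ∈ used <;>
    simp_all [Option.filter]

theorem mostCommon_eq_take_max (d : PySem.Dict Int Int) (n : Int) :
    mostCommon d n = (PySem.List.sorted d.items (fun kv => kv.2) true).take (max n 0).toNat := by
  unfold mostCommon
  split_ifs with h
  · have h0 : max n 0 = 0 := by omega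
    simp [h0]
  · have h0 : max n 0 = n := by omega
    rw [h0]

theorem betfold_head (l : List (Int × Int)) : ∀ (a : Int) (acc : List Int),
    ∃ t, l.foldl (fun bet kv => if bet.contains kv.1 then bet else bet ++ [kv.1]) (a :: acc)
      = a :: t := by
  induction l with
  | nil => exact fun a acc => ⟨acc, rfl⟩
  | cons kv l ih =>
    intro a acc
    rw [List.foldl_cons]
    cases hc : (a :: acc).contains kv.1 with
    | true =>
      rw [if_pos rfl]
      exact ih a acc
    | false =>
      rw [if_neg (by simp), List.cons_append]
      exact ih a (acc ++ [kv.1])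

theorem fillLoop_eq_aux (m pc : Int) (used : PySem.Set Int) :
    ∀ (fuel : Nat) (bet : List Int), (pc - bet.length).toNat = fuel →
    fillLoop m pc used bet
      = bet ++ ((PySem.List.pyRange 1 (m + 1) 1).filter
          (fun n => !bet.contains n && !(PySem.Set.contains used n))).take (pc - bet.length).toNat := by
  intro fuel
  induction fuel with
  | zero =>
    intro bet hf
    have hnot : ¬ ((bet.length : Int) < pc) := by omega
    rw [fillLoop]
    simp [hnot, hf]
  | succ f ih =>
    intro bet hf
    have hlt : (bet.length : Int) < pc := by omega
    rw [fillLoop]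
    cases hfind : (PySem.List.pyRange 1 (m + 1) 1).find?
        (fun n => !bet.contains n && !(PySem.Set.contains used n)) with
    | none =>
      have hnil : (PySem.List.pyRange 1 (m + 1) 1).filter
          (fun n => !bet.contains n && !(PySem.Set.contains used n)) = [] := by
        rw [List.filter_eq_nil_iff]
        intro x hx
        simpa using List.find?_eq_none.mp hfind x hx
      rw [dif_pos hlt, hnil]
      simp
    | some n =>
      rw [dif_pos hlt]
      show fillLoop m pc used (bet ++ [n]) = _
      have hf' : (pc - ((bet ++ [n]).length : Int)).toNat = f := by
        simp only [List.length_append, List.length_cons, List.length_nil]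
        omega
      rw [ih (bet ++ [n]) hf']
      have hhead : ((PySem.List.pyRange 1 (m + 1) 1).filter
          (fun n => !bet.contains n && !(PySem.Set.contains used n))).head? = some n := by
        rw [List.head?_filter, hfind]
      obtain ⟨T, hT⟩ : ∃ T, (PySem.List.pyRange 1 (m + 1) 1).filter
          (fun n => !bet.contains n && !(PySem.Set.contains used n)) = n :: T := by
        cases hc : (PySem.List.pyRange 1 (m + 1) 1).filter
            (fun n => !bet.contains n && !(PySem.Set.contains used n)) with
        | nil => rw [hc] at hhead; simp at hhead
        | cons a t =>
          rw [hc] at hhead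
          simp only [List.head?_cons, Option.some.injEq] at hhead
          exact ⟨t, by rw [hhead]⟩
      have hnodup := (PySem.List.nodup_pyRange_one 1 (m + 1)).filter
        (fun n => !bet.contains n && !(PySem.Set.contains used n))
      rw [hT] at hnodup
      have hnT : n ∉ T := (List.nodup_cons.mp hnodup).1
      have hfilter' : (PySem.List.pyRange 1 (m + 1) 1).filter
          (fun x => !(bet ++ [n]).contains x && !(PySem.Set.contains used x)) = T := by
        have hpt : ∀ x ∈ PySem.List.pyRange 1 (m + 1) 1,
            (!(bet ++ [n]).contains x && !(PySem.Set.contains used x))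
              = (!(x == n) && (!bet.contains x && !(PySem.Set.contains used x))) := by
          intro x _
          by_cases hxn : x = n <;> by_cases hxb : x ∈ bet <;>
            simp [hxn, hxb]
        calc (PySem.List.pyRange 1 (m + 1) 1).filter
              (fun x => !(bet ++ [n]).contains x && !(PySem.Set.contains used x))
            = (PySem.List.pyRange 1 (m + 1) 1).filter
              (fun x => !(x == n) && (!bet.contains x && !(PySem.Set.contains used x))) :=
              List.filter_congr hpt
          _ = ((PySem.List.pyRange 1 (m + 1) 1).filter
              (fun x => !bet.contains x && !(PySem.Set.contains used x))).filter
                (fun x => !(x == n)) := by rw [List.filter_filter]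
          _ = (n :: T).filter (fun x => !(x == n)) := by rw [hT]
          _ = T.filter (fun x => !(x == n)) := by
              rw [List.filter_cons]
              simp
          _ = T := by
              apply List.filter_eq_self.mpr
              intro x hx
              rw [Bool.not_eq_eq_eq_not, Bool.not_true, beq_eq_false_iff_ne]
              exact fun he => hnT (he ▸ hx)
      rw [hfilter', hf, hf', hT, List.take_succ_cons, List.append_assoc]
      rfl

theorem fillLoop_eq (m pc : Int) (used : PySem.Set Int) (bet : List Int) :
    fillLoop m pc used bet
      = bet ++ ((PySem.List.pyRange 1 (m + 1) 1).filter
          (fun n => !bet.contains n && !(PySem.Set.contains used n))).take (pc - bet.length).toNat :=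
  fillLoop_eq_aux m pc used _ bet rfl

theorem loop4 {σ : Type} (centers : List Int) (f : σ → Int → σ) (st : σ) :
    (PySem.List.pyRange 0 4 1).foldl (fun st i =>
        match PySem.List.pyGet? centers i with
        | none => st
        | some a => f st a) st
      = (centers.take 4).foldl f st := by
  have hr : PySem.List.pyRange 0 4 1 = [0, 1, 2, 3] := by decide
  rw [hr]
  match centers with
  | [] => simp [PySem.List.pyGet?, PySem.List.pyIdx?]
  | [a] => simp [PySem.List.pyGet?, PySem.List.pyIdx?]
  | [a, b] => simp [PySem.List.pyGet?, PySem.List.pyIdx?]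
  | [a, b, c] => simp [PySem.List.pyGet?, PySem.List.pyIdx?]
  | a :: b :: c :: d :: rest =>
    simp [PySem.List.pyGet?, PySem.List.pyIdx?,
      show ((3:Int) ≤ (rest.length:Int) + 1 + 1 + 1) from by omega,
      show ((2:Int) ≤ (rest.length:Int) + 1 + 1 + 1) from by omega,
      show ((1:Int) ≤ (rest.length:Int) + 1 + 1 + 1) from by omega,
      show ((0:Int) ≤ (rest.length:Int) + 1 + 1 + 1) from by omega]

theorem slice_take4 (centers : List Int) :
    PySem.List.slice centers none (some 4) = centers.take 4 := by
  simp [pysem]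

theorem slice_take1 (l : List Int) :
    PySem.List.slice l none (some 1) = l.take 1 := by
  simp [pysem]


theorem body_eq (L : List ((Int × Int) × Int)) (maxNum pickCount : Int)
    (st : List (List Int) × PySem.Set Int) (anchor : Int) :
    (let candidates : PySem.Dict Int Int :=
        L.foldl
          (fun cand kv =>
            if kv.1.1 == anchor && !(PySem.Set.contains st.2 kv.1.2) then
              cand.modify kv.1.2 0 (· + kv.2)
            else if kv.1.2 == anchor && !(PySem.Set.contains st.2 kv.1.1) then
              cand.modify kv.1.1 0 (· + kv.2)
            else cand)
          PySem.Dict.empty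
     let bet := (mostCommon candidates (pickCount - 1)).foldl
       (fun bet kv => if bet.contains kv.1 then bet else bet ++ [kv.1]) [anchor]
     let bet := fillLoop maxNum pickCount st.2 bet
     (st.1 ++ [PySem.List.sorted (PySem.List.slice bet none (some pickCount)) (fun x => x) false],
      (PySem.List.slice bet none (some 1)).foldl PySem.Set.add st.2))
    = (let cands := (((L.foldl
          (fun adj kv =>
            let a := PySem.Dict.modify adj kv.1.1 PySem.Dict.empty (fun d => d.modify kv.1.2 0 (· + kv.2))
            if kv.1.1 == kv.1.2 then a
            else PySem.Dict.modify a kv.1.2 PySem.Dict.empty (fun d => d.modify kv.1.1 0 (· + kv.2)))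
          PySem.Dict.empty).getD anchor PySem.Dict.empty).items).filter
            (fun kv => !(PySem.Set.contains st.2 kv.1))
       let ranked := PySem.List.sorted cands (fun kv => kv.2) true
       let bet := (ranked.take (max (pickCount - 1) 0).toNat).foldl
         (fun bet kv => if bet.contains kv.1 then bet else bet ++ [kv.1]) [anchor]
       let bet :=
         if (bet.length : Int) < pickCount then
           bet ++ ((PySem.List.pyRange 1 (maxNum + 1) 1).filter
             (fun n => !bet.contains n && !(PySem.Set.contains st.2 n))).take
               (pickCount - bet.length).toNat
         else bet
       (st.1 ++ [PySem.List.sorted (PySem.List.slice bet none (some pickCount)) (fun x => x) false],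
        PySem.Set.add st.2 anchor)) := by
  have hadj := adj_getD L PySem.Dict.empty anchor
  have hcand := cand_eq_wc anchor st.2 L
  have hitems : (wc PySem.Dict.empty ((nbrs L anchor).filter
      (fun kc => !(PySem.Set.contains st.2 kc.1)))).items
      = (wc PySem.Dict.empty (nbrs L anchor)).items.filter
        (fun kv => !(PySem.Set.contains st.2 kv.1)) := by
    exact wc_filter (fun k => !(PySem.Set.contains st.2 k)) (nbrs L anchor) PySem.Dict.empty PySem.Dict.empty
      PySem.Dict.nodup_keys_empty PySem.Dict.nodup_keys_empty (by simp [PySem.Dict.empty])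
  simp only []
  rw [hcand, mostCommon_eq_take_max, hitems, hadj]
  rw [show (PySem.Dict.empty : PySem.Dict Int (PySem.Dict Int Int)).getD anchor PySem.Dict.empty
      = PySem.Dict.empty from rfl]
  rw [fillLoop_eq]
  obtain ⟨t, ht⟩ := betfold_head
    ((PySem.List.sorted ((wc PySem.Dict.empty (nbrs L anchor)).items.filter
        (fun kv => !(PySem.Set.contains st.2 kv.1))) (fun kv => kv.2) true).take
      (max (pickCount - 1) 0).toNat) anchor []
  by_cases hlen : ((((PySem.List.sorted ((wc PySem.Dict.empty (nbrs L anchor)).items.filter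
        (fun kv => !(PySem.Set.contains st.2 kv.1))) (fun kv => kv.2) true).take
      (max (pickCount - 1) 0).toNat).foldl
        (fun bet kv => if bet.contains kv.1 then bet else bet ++ [kv.1]) [anchor]).length : Int)
      < pickCount
  · rw [if_pos hlen]
    rw [ht, slice_take1]
    simp
  · rw [if_neg hlen]
    have h0 : (pickCount - ((((PySem.List.sorted ((wc PySem.Dict.empty (nbrs L anchor)).items.filter
        (fun kv => !(PySem.Set.contains st.2 kv.1))) (fun kv => kv.2) true).take
      (max (pickCount - 1) 0).toNat).foldl
        (fun bet kv => if bet.contains kv.1 then bet else bet ++ [kv.1]) [anchor]).length : Int)).toNat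
        = 0 := by omega
    rw [h0]
    rw [ht, slice_take1]
    simp

theorem cluster_pivot_4bet_eq_alt (history : List (List (String × List Int))) (rules : List (String × Int)) :
    cluster_pivot_4bet history rules = cluster_pivot_4bet_alt history rules := by
  simp only [cluster_pivot_4bet, cluster_pivot_4bet_alt]
  rw [PySem.Dict.counter_eq_foldl, List.foldl_flatMap]
  rw [PySem.List.foldl_prod_mk
    (f := fun (ns : PySem.Dict Int Int) (kv : (Int × Int) × Int) =>
      (ns.modify kv.1.1 0 (· + kv.2)).modify kv.1.2 0 (· + kv.2))
    (g := fun (adj : PySem.Dict Int (PySem.Dict Int Int)) (kv : (Int × Int) × Int) =>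
      let a := PySem.Dict.modify adj kv.1.1 PySem.Dict.empty (fun d => d.modify kv.1.2 0 (· + kv.2))
      if kv.1.1 == kv.1.2 then a
      else PySem.Dict.modify a kv.1.2 PySem.Dict.empty (fun d => d.modify kv.1.1 0 (· + kv.2)))]
  rw [slice_take4]
  refine congrArg (fun r : List (List Int) × PySem.Set Int => [("details", [("bets", r.1)])]) ?_
  exact (loop4 _ _ _).trans
    (PySem.List.foldl_congr_mem _ _ _ _ (fun acc x _ => body_eq _ _ _ acc x))

-- ===== VERDICT (by name: the statement is the Claim_ definition above) =====
theorem cluster_pivot_4bet_spec : Claim_equal_cluster_pivot_4bet := by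
  intro history rules _ _
  unfold Spec_cluster_pivot_4bet
  exact cluster_pivot_4bet_eq_alt history rules
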